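-- pv_equiv track=rewrite | github.com/Disi77/roman_numerals | rim_num.py | rozpad_na_mezivysledky
-- ===== SOURCE A (Python) =====
-- def rozpad_na_mezivysledky(cislo_vstup):
--     '''
--     Původně zadané číslo se rozpadne na mezivýsledky.
--     '''
--     seznam_mezivysledky = []
--     mezivysledek = ''
--     for i in range(len(cislo_vstup)):
--         try:
--             if seznam_rim_cisel[cislo_vstup[i]] == seznam_rim_cisel[cislo_vstup[i+1]]:
--                 mezivysledek += cislo_vstup[i]
--             elif seznam_rim_cisel[cislo_vstup[i]] < seznam_rim_cisel[cislo_vstup[i+1]]: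
--                 mezivysledek += cislo_vstup[i]
--             elif seznam_rim_cisel[cislo_vstup[i]] > seznam_rim_cisel[cislo_vstup[i+1]]:
--                 mezivysledek += cislo_vstup[i]
--                 seznam_mezivysledky.append(mezivysledek)
--                 mezivysledek = ''
--         except IndexError:
--             mezivysledek += cislo_vstup[i]
--             seznam_mezivysledky.append(mezivysledek)
--             mezivysledek = ''
--     return seznam_mezivysledky
--
-- seznam_rim_cisel = {'I': 1, 'V': 5, 'X': 10, 'L': 50, 'C': 100, 'D': 500, 'M': 1000}
-- ===== SOURCE B (Python) =====
-- seznam_rim_cisel = {'I': 1, 'V': 5, 'X': 10, 'L': 50, 'C': 100, 'D': 500, 'M': 1000}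
--
-- def rozpad_na_mezivysledky(cislo_vstup):
--     '''Right-to-left fold: prepend each char to the first group while it fits, else open a new group.'''
--     groups = []
--     for c in reversed(cislo_vstup):
--         if groups and seznam_rim_cisel[c] <= seznam_rim_cisel[groups[0][0]]:
--             groups[0] = c + groups[0]
--         else:
--             groups.insert(0, c)
--     return groups
-- ===== Notes on version B (the rewrite author's own statement) =====
-- stated objective: simpler
-- what changed: A scans left-to-right with a one-character lookahead, three comparison branches and an accumulator string flushed on strict descent (or caught IndexError at the end); B folds right-to-left, prepending each character to the first group while its value fits (<=) and opening a new group otherwise, with no lookahead, no accumulator and a single branch.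
-- outside the precondition, e.g. on rozpad_na_mezivysledky('IQ'): A raises KeyError, B raises KeyError
import Mathlib
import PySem

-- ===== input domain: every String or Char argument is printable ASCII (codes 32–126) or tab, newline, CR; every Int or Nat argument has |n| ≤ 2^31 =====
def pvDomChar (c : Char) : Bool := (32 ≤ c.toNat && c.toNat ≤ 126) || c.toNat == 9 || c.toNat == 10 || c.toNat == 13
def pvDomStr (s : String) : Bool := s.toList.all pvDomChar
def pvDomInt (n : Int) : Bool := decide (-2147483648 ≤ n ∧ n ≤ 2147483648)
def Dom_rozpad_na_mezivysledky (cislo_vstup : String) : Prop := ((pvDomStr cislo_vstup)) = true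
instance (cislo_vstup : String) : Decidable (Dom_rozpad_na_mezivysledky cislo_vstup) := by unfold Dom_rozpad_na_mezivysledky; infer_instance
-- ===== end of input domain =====

-- B replaces A's left-to-right lookahead loop with a right-to-left fold that prepends each
-- character to the current first group or opens a new one (objective: simpler).

-- module constant shared by both Pythons
def seznam_rim_cisel : PySem.Dict Char Int :=
  PySem.Dict.ofList [('I', 1), ('V', 5), ('X', 10), ('L', 50), ('C', 100), ('D', 500), ('M', 1000)]

-- dict lookup; exact on Pre_ (every char a key); on a missing key Python raises KeyError (excluded by Pre_)
def rimVal (c : Char) : Int := PySem.Dict.getD seznam_rim_cisel c 0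

-- ===== PORT A =====
-- A's 'for i in range(len(...))' loop with lookup of cislo_vstup[i+1] becomes the obvious
-- structural recursion with one-element lookahead over the same state (seznam_mezivysledky, mezivysledek);
-- the lone-last-character case is A's caught IndexError branch.
def aGo (acc : List (List Char)) (mez : List Char) : List Char → List (List Char)
  | [] => acc
  | [c] => acc ++ [mez ++ [c]]
  | c :: d :: rest =>
      if rimVal c == rimVal d then aGo acc (mez ++ [c]) (d :: rest)
      else if rimVal c < rimVal d then aGo acc (mez ++ [c]) (d :: rest)
      else aGo (acc ++ [mez ++ [c]]) [] (d :: rest)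

def rozpad_na_mezivysledky (cislo_vstup : String) : List String :=
  (aGo [] [] cislo_vstup.toList).map (fun g => String.ofList g)

-- ===== PORT B =====
def bStep (groups : List (List Char)) (c : Char) : List (List Char) :=
  match groups with
  | [] => [[c]]
  | g :: rest =>
      if rimVal c ≤ rimVal (g.headD ' ') then (c :: g) :: rest
      else [c] :: g :: rest

def rozpad_na_mezivysledky_alt (cislo_vstup : String) : List String :=
  (cislo_vstup.toList.reverse.foldl bStep []).map (fun g => String.ofList g)

-- ===== PRECONDITION & SPEC =====
-- Pre_ excludes exactly the inputs containing a character that is not a roman-numeral key,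
-- on which Python A raises KeyError (the try only catches IndexError).
def Pre_rozpad_na_mezivysledky (cislo_vstup : String) : Prop :=
  (cislo_vstup.toList.all (fun c => (['I', 'V', 'X', 'L', 'C', 'D', 'M'] : List Char).contains c)) = true
instance (cislo_vstup : String) : Decidable (Pre_rozpad_na_mezivysledky cislo_vstup) := by
  unfold Pre_rozpad_na_mezivysledky; infer_instance
def pvWitness_rozpad_na_mezivysledky : String := "MCMXIV"

def Spec_rozpad_na_mezivysledky (cislo_vstup : String) (out : List String) : Prop := out = rozpad_na_mezivysledky_alt cislo_vstup
instance (cislo_vstup : String) (out : List String) : Decidable (Spec_rozpad_na_mezivysledky cislo_vstup out) := by unfold Spec_rozpad_na_mezivysledky; infer_instance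

-- ===== CLAIM (what is proved, stated in full; the proofs are below) =====
def Claim_equal_rozpad_na_mezivysledky : Prop := ∀ (cislo_vstup : String), Dom_rozpad_na_mezivysledky cislo_vstup → Pre_rozpad_na_mezivysledky cislo_vstup → Spec_rozpad_na_mezivysledky cislo_vstup (rozpad_na_mezivysledky cislo_vstup)

-- ===== LEMMAS AND PROOFS =====

-- B's loop over reversed(input) as a foldr
def bres (cs : List Char) : List (List Char) := List.foldr (fun c g => bStep g c) [] cs

lemma bres_eq_foldl (cs : List Char) : cs.reverse.foldl bStep [] = bres cs := by
  simp [bres, List.foldl_reverse]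

-- the joint invariant: B's groups are exactly A's groups-to-come, and A's accumulated
-- partial group is prepended to the first of them; the first group starts with the head char.
theorem key : ∀ (cs : List Char) (acc : List (List Char)) (mez : List Char),
    (cs = [] ∧ bres cs = [] ∧ aGo acc mez cs = acc) ∨
    (∃ c rest h t, cs = c :: rest ∧ bres cs = (c :: h) :: t ∧
      aGo acc mez cs = acc ++ (mez ++ c :: h) :: t)
  | [], _, _ => Or.inl ⟨rfl, rfl, rfl⟩
  | [c], acc, mez => Or.inr ⟨c, [], [], [], rfl, rfl, rfl⟩
  | c :: d :: rest, acc, mez => by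
    right
    rcases key (d :: rest) acc mez with ⟨h1, _, _⟩ | ⟨c', rest'', h, t, heq, hb, _⟩
    · exact absurd h1 (by simp)
    obtain ⟨rfl, rfl⟩ := List.cons_eq_cons.mp heq
    have ihStep : ∀ (acc' : List (List Char)) (mez' : List Char),
        aGo acc' mez' (d :: rest) = acc' ++ (mez' ++ d :: h) :: t := by
      intro acc' mez'
      rcases key (d :: rest) acc' mez' with ⟨h1, _, _⟩ | ⟨c'', rest2, h', t', heq', hb', ha'⟩
      · exact absurd h1 (by simp)
      · obtain ⟨rfl, rfl⟩ := List.cons_eq_cons.mp heq'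
        rw [hb] at hb'
        obtain ⟨hh, rfl⟩ := List.cons_eq_cons.mp hb'
        obtain ⟨-, rfl⟩ := List.cons_eq_cons.mp hh
        exact ha'
    rcases lt_trichotomy (rimVal c) (rimVal d) with hLt | hE | hGt
    · -- '<' branch: keep accumulating
      refine ⟨c, d :: rest, d :: h, t, rfl, ?_, ?_⟩
      · show bStep (bres (d :: rest)) c = _
        rw [hb]; simp [bStep, le_of_lt hLt]
      · have hne : ¬ (rimVal c == rimVal d) = true := by simp [ne_of_lt hLt]
        simp only [aGo, hne, if_pos hLt, Bool.false_eq_true]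
        rw [ihStep acc (mez ++ [c])]; simp
    · -- '==' branch: keep accumulating
      refine ⟨c, d :: rest, d :: h, t, rfl, ?_, ?_⟩
      · show bStep (bres (d :: rest)) c = _
        rw [hb]; simp [bStep, le_of_eq hE]
      · have hbeq : (rimVal c == rimVal d) = true := beq_iff_eq.mpr hE
        simp only [aGo, hbeq, if_pos]
        rw [ihStep acc (mez ++ [c])]; simp
    · -- '>' branch: close the current group
      refine ⟨c, d :: rest, [], (d :: h) :: t, rfl, ?_, ?_⟩
      · show bStep (bres (d :: rest)) c = _
        rw [hb]; simp [bStep, not_le.mpr hGt]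
      · have hne : ¬ (rimVal c == rimVal d) = true := by simp [(ne_of_lt hGt).symm]
        have hnlt : ¬ rimVal c < rimVal d := not_lt.mpr (le_of_lt hGt)
        simp only [aGo, hne, hnlt, Bool.false_eq_true]
        rw [ihStep (acc ++ [mez ++ [c]]) []]; simp

lemma aGo_eq_bres (cs : List Char) : aGo [] [] cs = bres cs := by
  rcases key cs [] [] with ⟨rfl, hb, ha⟩ | ⟨c, rest, h, t, rfl, hb, ha⟩
  · rw [hb, ha]
  · rw [hb, ha]; simp

-- ===== VERDICT (by name: the statement is the Claim_ definition above) =====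
theorem rozpad_na_mezivysledky_spec : Claim_equal_rozpad_na_mezivysledky := by
  intro s _ _
  show rozpad_na_mezivysledky s = rozpad_na_mezivysledky_alt s
  unfold rozpad_na_mezivysledky rozpad_na_mezivysledky_alt
  rw [aGo_eq_bres, bres_eq_foldl]
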